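-- pv_equiv track=rewrite | github.com/MikeMitop/QuizCadenaCaracteres | CadenaCaracteres.py | afd_scanner
-- ===== SOURCE A (Python) =====
-- def afd_scanner(lexema):
--
--     estado = 0
--
--     for char in lexema:
--         if estado == 0:
--             if char.isalpha(): estado = 1
--             elif char.isdigit(): estado = 2
--             elif char == '+': estado = 3
--             else: return False
--
--         elif estado == 1:
--             if char.isalnum(): estado = 1
--             else: return False
--
--         elif estado == 2:
--             if char.isdigit(): estado = 2
--             else: return False
--
--         elif estado == 3:
--             if char == '+': estado = 4
--             else: return False
--
--         elif estado == 4: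
--             return False
--
--     return estado in [1, 2, 3, 4]
-- ===== SOURCE B (Python) =====
-- def afd_scanner(lexema):
--     # Branch on the first character and use whole-string predicates
--     # instead of a per-character state machine.
--     if not lexema:
--         return False
--     c = lexema[0]
--     if c.isalpha():
--         return lexema.isalnum()
--     if c.isdigit():
--         return lexema.isdigit()
--     if c == '+':
--         return lexema == '+' or lexema == '++'
--     return False
-- ===== Notes on version B (the rewrite author's own statement) =====
-- stated objective: simpler
-- what changed: Replaced the 5-state DFA loop with a first-character branch using whole-string predicates (isalnum/isdigit) and literal comparison for '+'/'++'; the interpreted per-character loop becomes bulk built-in string predicates.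
import Mathlib
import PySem

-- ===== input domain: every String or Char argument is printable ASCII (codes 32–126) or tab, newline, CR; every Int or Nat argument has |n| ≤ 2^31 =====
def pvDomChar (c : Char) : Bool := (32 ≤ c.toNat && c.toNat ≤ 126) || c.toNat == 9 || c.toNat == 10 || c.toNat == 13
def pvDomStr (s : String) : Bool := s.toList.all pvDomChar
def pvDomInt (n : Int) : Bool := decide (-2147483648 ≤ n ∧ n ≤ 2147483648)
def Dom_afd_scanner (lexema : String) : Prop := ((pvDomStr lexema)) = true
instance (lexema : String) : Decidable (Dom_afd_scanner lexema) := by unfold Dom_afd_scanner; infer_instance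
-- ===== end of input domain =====

-- B replaces A's per-character 5-state DFA loop with a first-character branch
-- over whole-string predicates; objective: simpler.

-- ===== PORT A =====
-- the 'for char in lexema' loop with its early returns, state carried explicitly
def afdLoop : Nat → List Char → Bool
  | estado, [] => decide (estado ∈ [1, 2, 3, 4])
  | estado, c :: rest =>
    if estado = 0 then
      if PySem.Chars.isalpha c then afdLoop 1 rest
      else if PySem.Chars.isdigit c then afdLoop 2 rest
      else if c = '+' then afdLoop 3 rest
      else false
    else if estado = 1 then
      if PySem.Chars.isalnum c then afdLoop 1 rest else false
    else if estado = 2 then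
      if PySem.Chars.isdigit c then afdLoop 2 rest else false
    else if estado = 3 then
      if c = '+' then afdLoop 4 rest else false
    else if estado = 4 then false
    else afdLoop estado rest  -- unreachable fall-through (no matching branch in Python)

def afd_scanner (lexema : String) : Bool := afdLoop 0 lexema.toList

-- ===== PORT B =====
def afd_scanner_alt (lexema : String) : Bool :=
  match lexema.toList with
  | [] => false
  | c :: _ =>
    if PySem.Chars.isalpha c then PySem.Str.strIsalnum lexema
    else if PySem.Chars.isdigit c then PySem.Str.strIsdigit lexema
    else if c = '+' then decide (lexema.toList = ['+']) || decide (lexema.toList = ['+', '+'])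
    else false

-- ===== PRECONDITION & SPEC =====
def Spec_afd_scanner (lexema : String) (out : Bool) : Prop := out = afd_scanner_alt lexema
instance (lexema : String) (out : Bool) : Decidable (Spec_afd_scanner lexema out) := by unfold Spec_afd_scanner; infer_instance

-- ===== CLAIM (what is proved, stated in full; the proofs are below) =====
def Claim_equal_afd_scanner : Prop := ∀ (lexema : String), Dom_afd_scanner lexema → Spec_afd_scanner lexema (afd_scanner lexema)

-- ===== LEMMAS AND PROOFS =====

lemma afdLoop_one (cs : List Char) : afdLoop 1 cs = cs.all PySem.Chars.isalnum := by
  induction cs with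
  | nil => simp [afdLoop]
  | cons c rest ih => by_cases h : PySem.Chars.isalnum c = true <;> simp [afdLoop, h, ih]

lemma afdLoop_two (cs : List Char) : afdLoop 2 cs = cs.all PySem.Chars.isdigit := by
  induction cs with
  | nil => simp [afdLoop]
  | cons c rest ih => by_cases h : PySem.Chars.isdigit c = true <;> simp [afdLoop, h, ih]

lemma afdLoop_three (cs : List Char) :
    afdLoop 3 cs = (decide (cs = []) || decide (cs = ['+'])) := by
  cases cs with
  | nil => simp [afdLoop]
  | cons c rest =>
    by_cases h : c = '+'
    · subst h
      cases rest <;> simp [afdLoop]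
    · simp [afdLoop, h]

-- ===== VERDICT (by name: the statement is the Claim_ definition above) =====
theorem afd_scanner_spec : Claim_equal_afd_scanner := by
  intro lexema _
  show afd_scanner lexema = afd_scanner_alt lexema
  unfold afd_scanner afd_scanner_alt
  cases hcs : lexema.toList with
  | nil => simp [afdLoop]
  | cons c rest =>
    by_cases ha : PySem.Chars.isalpha c = true
    · simp [afdLoop, ha, afdLoop_one, PySem.Str.strIsalnum, PySem.Chars.strIsalnum,
        hcs, PySem.Chars.isalnum]
    · by_cases hd : PySem.Chars.isdigit c = true
      · simp [afdLoop, ha, hd, afdLoop_two, PySem.Str.strIsdigit, PySem.Chars.strIsdigit, hcs]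
      · by_cases hp : c = '+'
        · subst hp
          simp [afdLoop, ha, hd, afdLoop_three]
        · simp [afdLoop, ha, hd, hp]
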